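-- pv_equiv track=rewrite | github.com/nicolajack/BUCS111 | ps3/ps3pr4.py | double_final
-- ===== SOURCE A (Python) =====
-- def double_final(n, values):
--     """takes as inputs an integer n and an arbitrary list of integers values and that uses recursion to create and return a version of values in which only the final occurrence of n (if any) has been doubled."""
--     if n == None:
--         return values
--     elif values == []:
--         return values
--     elif n not in values:
--         return values
--     else:
--         rest_double = double_final(n, values[:-1])
--         if n == values[-1]:
--             return values[:-1] + [n * 2]
--         else:
--             return rest_double + [values[-1]]
-- ===== SOURCE B (Python) =====
-- def double_final(n, values):
--     """Same behaviour as A: double only the final occurrence of n in values."""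
--     if n == None:
--         return values
--     if values == [] or n not in values:
--         return values
--     idx = -1
--     for i, element in enumerate(values):
--         if element == n:
--             idx = i
--     result = list(values)
--     result[idx] = n * 2
--     return result
-- ===== Notes on version B (the rewrite author's own statement) =====
-- stated objective: simpler
-- what changed: Replaces A's recursive peel-from-the-right with list slicing by one flat forward scan that records the last index of n and a single in-place rewrite of a copy.
import Mathlib
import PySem

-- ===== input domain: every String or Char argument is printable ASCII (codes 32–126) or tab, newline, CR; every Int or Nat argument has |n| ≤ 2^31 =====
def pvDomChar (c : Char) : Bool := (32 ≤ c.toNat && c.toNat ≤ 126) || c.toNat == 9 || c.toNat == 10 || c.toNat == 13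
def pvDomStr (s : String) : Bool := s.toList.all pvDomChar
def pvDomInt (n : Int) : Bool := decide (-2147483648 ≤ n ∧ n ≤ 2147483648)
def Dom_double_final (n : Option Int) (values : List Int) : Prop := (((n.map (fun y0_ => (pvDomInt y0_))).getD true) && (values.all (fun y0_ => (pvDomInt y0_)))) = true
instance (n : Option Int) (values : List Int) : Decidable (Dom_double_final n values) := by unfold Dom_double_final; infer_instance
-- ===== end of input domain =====

-- B replaces A's recursive right-peel (slicing) with one flat forward scan for the
-- last index of n and a single element rewrite: simpler, no recursion.

-- ===== PORT A =====
-- Literal transliteration of A's recursion on values[:-1] / values[-1].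
def double_final (n : Option Int) (values : List Int) : List Int :=
  match n with
  | none => values
  | some m =>
    if h : values = [] then values
    else if m ∉ values then values
    else
      let rest_double := double_final (some m) (PySem.List.slice values none (some (-1)))
      if m = values.getLast h then
        PySem.List.slice values none (some (-1)) ++ [m * 2]
      else
        rest_double ++ [values.getLast h]
termination_by values.length
decreasing_by
  simp [PySem.List.slice_to_neg_one, List.length_dropLast]
  cases values with
  | nil => exact absurd rfl h
  | cons x xs => simp

-- ===== PORT B =====
-- Literal transliteration of Source B: guards, the enumerate scan for the last index,
-- then result = list(values); result[idx] = n * 2.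
def double_final_alt (n : Option Int) (values : List Int) : List Int :=
  match n with
  | none => values
  | some m =>
    if values = [] ∨ m ∉ values then values
    else
      let idx := (PySem.List.enumerate values 0).foldl
        (fun acc p => if p.2 = m then p.1 else acc) (-1)
      PySem.List.pySetD values idx (m * 2)

-- ===== PRECONDITION & SPEC =====
def Spec_double_final (n : Option Int) (values : List Int) (out : List Int) : Prop := out = double_final_alt n values
instance (n : Option Int) (values : List Int) (out : List Int) : Decidable (Spec_double_final n values out) := by unfold Spec_double_final; infer_instance

-- ===== CLAIM (what is proved, stated in full; the proofs are below) =====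
def Claim_equal_double_final : Prop := ∀ (n : Option Int) (values : List Int), Dom_double_final n values → Spec_double_final n values (double_final n values)

-- ===== LEMMAS AND PROOFS =====

-- The last-index scan of B, generalized over the enumerate start and accumulator.
def pvScan (m : Int) (s : Int) (vs : List Int) (acc : Int) : Int :=
  (PySem.List.enumerate vs s).foldl (fun acc p => if p.2 = m then p.1 else acc) acc

theorem pvScan_append (m s : Int) (vs : List Int) (v acc : Int) :
    pvScan m s (vs ++ [v]) acc =
      if v = m then s + vs.length else pvScan m s vs acc := by
  simp [pvScan, PySem.List.enumerate_append, List.foldl_append,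
    PySem.List.enumerate_cons]

theorem pvScan_bounds (m s : Int) (vs : List Int) (acc : Int) (hm : m ∈ vs) :
    s ≤ pvScan m s vs acc ∧ pvScan m s vs acc < s + vs.length := by
  induction vs using List.reverseRecOn generalizing acc with
  | nil => simp at hm
  | append_singleton vs v ih =>
    rw [pvScan_append]
    by_cases hv : v = m
    · rw [if_pos hv]
      refine ⟨by omega, ?_⟩
      simp only [List.length_append, List.length_cons, List.length_nil]
      omega
    · have hm' : m ∈ vs := by
        rcases List.mem_append.mp hm with h | h
        · exact h
        · simp at h; exact absurd h.symm hv
      have := ih acc hm'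
      rw [if_neg hv]
      simp only [List.length_append, List.length_cons, List.length_nil]
      omega

theorem double_final_core (m : Int) (values : List Int) :
    double_final (some m) values = double_final_alt (some m) values := by
  induction values using List.reverseRecOn with
  | nil => simp [double_final, double_final_alt]
  | append_singleton vs v ih =>
    by_cases hmem : m ∈ vs ++ [v]
    · rw [double_final]
      have hne : vs ++ [v] ≠ [] := by simp
      rw [dif_neg hne, if_neg (not_not_intro hmem), double_final_alt,
        if_neg (not_or.mpr ⟨hne, not_not_intro hmem⟩)]
      rw [List.getLast_append_singleton (l := vs)]
      by_cases hv : m = v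
      · -- last element matches: A returns vs ++ [2m]; B sets index vs.length
        simp only [if_pos hv]
        have hscan : pvScan m 0 (vs ++ [v]) (-1) = (vs.length : Int) := by
          rw [pvScan_append]; simp [hv.symm]
        show PySem.List.slice (vs ++ [v]) none (some (-1)) ++ [m * 2] = _
        rw [show (PySem.List.enumerate (vs ++ [v]) 0).foldl
            (fun acc p => if p.2 = m then p.1 else acc) (-1) = pvScan m 0 (vs ++ [v]) (-1) from rfl,
          hscan]
        simp [PySem.List.slice_to_neg_one, PySem.List.pySetD_natCast,
          List.set_append_right]
      · -- last element differs: recurse on vs, m ∈ vs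
        simp only [if_neg hv]
        have hm' : m ∈ vs := by
          rcases List.mem_append.mp hmem with h | h
          · exact h
          · simp at h; exact absurd h hv
        have hscan : pvScan m 0 (vs ++ [v]) (-1) = pvScan m 0 vs (-1) := by
          rw [pvScan_append, if_neg (fun h => hv h.symm)]
        have hb := pvScan_bounds m 0 vs (-1) hm'
        show double_final (some m) (PySem.List.slice (vs ++ [v]) none (some (-1))) ++ [v] = _
        rw [PySem.List.slice_to_neg_one, List.dropLast_concat, ih]
        rw [show (PySem.List.enumerate (vs ++ [v]) 0).foldl
            (fun acc p => if p.2 = m then p.1 else acc) (-1) = pvScan m 0 (vs ++ [v]) (-1) from rfl,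
          hscan]
        rw [double_final_alt]
        rw [if_neg (not_or.mpr ⟨List.ne_nil_of_mem hm', not_not_intro hm'⟩)]
        rw [show (PySem.List.enumerate vs 0).foldl
            (fun acc p => if p.2 = m then p.1 else acc) (-1) = pvScan m 0 vs (-1) from rfl]
        show PySem.List.pySetD vs (pvScan m 0 vs (-1)) (m * 2) ++ [v] =
          PySem.List.pySetD (vs ++ [v]) (pvScan m 0 vs (-1)) (m * 2)
        rw [PySem.List.pySetD_of_nonneg _ _ (by omega),
          PySem.List.pySetD_of_nonneg _ _ (by omega)]
        rw [List.set_append_left]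
        omega
    · rw [double_final, double_final_alt]
      simp [hmem]

-- ===== VERDICT (by name: the statement is the Claim_ definition above) =====
theorem double_final_spec : Claim_equal_double_final := by
  intro n values _
  unfold Spec_double_final
  cases n with
  | none => rw [double_final, double_final_alt]
  | some m => exact double_final_core m values
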